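-- pv_equiv track=rewrite | github.com/1Aberratio/50_days | day_23.py | multiply_words
-- ===== SOURCE A (Python) =====
-- def multiply_words(string):
--     mult = 1; w_len = []
--     for word in string.split():
--         if word == word.capitalize(): continue
--         else:
--             mult *= len(word)
--             w_len.append(word)
--             w_len.append(f'({len(word)})')
--     return f"{mult} - {' '.join(w_len)}"
-- ===== SOURCE B (Python) =====
-- def multiply_words(string):
--     def go(words):
--         # recursion on the word list, building product and body back-to-front
--         if not words:
--             return 1, ""
--         prod, rest = go(words[1:])
--         w = words[0]
--         if w == w.capitalize():
--             return prod, rest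
--         piece = f"{w} ({len(w)})"
--         return prod * len(w), piece if not rest else f"{piece} {rest}"
--     prod, body = go(string.split())
--     return f"{prod} - {body}"
-- ===== Notes on version B (the rewrite author's own statement) =====
-- stated objective: alternative
-- what changed: Replaces A's left-to-right loop with two forward accumulators (running product, flat token list joined at the end) by a single recursion over the word list that builds the result back-to-front: it recurses first, then combines the head word's product factor and rendered piece with the already-rendered tail string, never materialising a token list or calling join.
import Mathlib
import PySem

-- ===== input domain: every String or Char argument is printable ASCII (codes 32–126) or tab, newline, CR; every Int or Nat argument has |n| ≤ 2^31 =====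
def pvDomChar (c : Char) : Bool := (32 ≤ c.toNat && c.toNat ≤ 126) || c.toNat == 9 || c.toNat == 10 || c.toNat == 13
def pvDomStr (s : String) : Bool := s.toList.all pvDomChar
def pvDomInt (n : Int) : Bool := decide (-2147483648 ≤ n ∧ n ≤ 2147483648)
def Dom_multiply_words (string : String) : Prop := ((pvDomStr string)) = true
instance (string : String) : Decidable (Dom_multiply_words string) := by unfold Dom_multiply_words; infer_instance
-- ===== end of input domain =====

-- B: one recursion over the word list building product and rendered body back-to-front
-- (no intermediate token list, no join) instead of A's forward loop with two accumulators.

-- ===== PORT A =====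
-- Python str.capitalize(): first character uppercased, the rest lowercased (exact on ASCII).
def pyCapitalize (cs : List Char) : List Char :=
  match cs with
  | [] => []
  | c :: rest => PySem.Chars.upperChar c :: PySem.Chars.lower rest

-- the "(n)" token for a word
def mwTok (w : List Char) : List Char := '(' :: (PySem.Int.toChars (w.length : Int) ++ [')'])

-- the body of A's for-loop: skip capitalized words, else update (mult, w_len)
def mwStep (st : Int × List (List Char)) (word : List Char) : Int × List (List Char) :=
  if word = pyCapitalize word then st
  else (st.1 * (word.length : Int), st.2 ++ [word] ++ [mwTok word])

def multiply_words (string : String) : String :=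
  let r := (PySem.Chars.split₀ string.toList).foldl mwStep (1, [])
  String.ofList (PySem.Int.toChars r.1 ++ (' ' :: '-' :: ' ' :: PySem.Chars.join [' '] r.2))

-- ===== PORT B =====
-- go(words): recurse on the tail first, then fold the head word in (back-to-front build)
def mwGo : List (List Char) → Int × List Char
  | [] => (1, [])
  | w :: ws =>
    let r := mwGo ws
    if w = pyCapitalize w then r
    else
      let piece := w ++ ' ' :: mwTok w
      (r.1 * (w.length : Int), if r.2 = [] then piece else piece ++ ' ' :: r.2)

def multiply_words_alt (string : String) : String :=
  let r := mwGo (PySem.Chars.split₀ string.toList)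
  String.ofList (PySem.Int.toChars r.1 ++ (' ' :: '-' :: ' ' :: r.2))

-- ===== PRECONDITION & SPEC =====
def Spec_multiply_words (string : String) (out : String) : Prop := out = multiply_words_alt string
instance (string : String) (out : String) : Decidable (Spec_multiply_words string out) := by unfold Spec_multiply_words; infer_instance

-- ===== CLAIM (what is proved, stated in full; the proofs are below) =====
def Claim_equal_multiply_words : Prop := ∀ (string : String), Dom_multiply_words string → Spec_multiply_words string (multiply_words string)

-- ===== LEMMAS AND PROOFS =====

def mwPred : List Char → Bool := fun w => decide (w ≠ pyCapitalize w)

def mwPiece (w : List Char) : List Char := w ++ ' ' :: mwTok w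

def mwJ (L : List (List Char)) : List Char := PySem.Chars.join [' '] (L.map mwPiece)

theorem mwJ_ne_nil (L : List (List Char)) (h : L ≠ []) : mwJ L ≠ [] := by
  match L with
  | [] => exact absurd rfl h
  | [v] => rw [mwJ, List.map_cons, List.map_nil, PySem.Chars.join_singleton]; simp [mwPiece]
  | v :: u :: L' =>
    unfold mwJ
    rw [List.map_cons, List.map_cons, PySem.Chars.join_cons_cons]
    simp [mwPiece]

-- A's fold = product and flat token list over the filtered words
theorem mwStep_foldl (ws : List (List Char)) :
    ∀ (m : Int) (acc : List (List Char)),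
      ws.foldl mwStep (m, acc) =
        ((ws.filter mwPred).foldl (fun (m : Int) w => m * (w.length : Int)) m,
         acc ++ (ws.filter mwPred).flatMap (fun w => [w, mwTok w])) := by
  induction ws with
  | nil => intro m acc; simp
  | cons w ws ih =>
    intro m acc
    by_cases h : w = pyCapitalize w
    · have hd : mwPred w = false := by unfold mwPred; exact decide_eq_false (not_not_intro h)
      rw [List.foldl_cons, show mwStep (m, acc) w = (m, acc) from by unfold mwStep; rw [if_pos h],
        ih, List.filter_cons, hd]
      simp
    · have hd : mwPred w = true := by unfold mwPred; exact decide_eq_true h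
      rw [List.foldl_cons,
        show mwStep (m, acc) w = (m * (w.length : Int), acc ++ [w] ++ [mwTok w]) from by
          unfold mwStep; rw [if_neg h], ih, List.filter_cons, hd]
      simp [List.append_assoc]

-- joining the flat token list = joining the pre-assembled per-word pieces
theorem mw_join_pieces (ws : List (List Char)) :
    PySem.Chars.join [' '] (ws.flatMap (fun w => [w, mwTok w])) = mwJ ws := by
  induction ws with
  | nil => rfl
  | cons w ws ih =>
    cases ws with
    | nil => simp [PySem.Chars.join, List.intercalate, mwJ, mwPiece]
    | cons v ws' =>
      have hl : PySem.Chars.join [' '] (((w :: v :: ws').flatMap (fun w => [w, mwTok w]))) =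
          w ++ [' '] ++ (mwTok w ++ [' '] ++ PySem.Chars.join [' '] ((v :: ws').flatMap (fun w => [w, mwTok w]))) := by
        simp [PySem.Chars.join_cons_cons, List.append_assoc]
      have hr : mwJ (w :: v :: ws') =
          mwPiece w ++ [' '] ++ mwJ (v :: ws') := by
        unfold mwJ
        rw [List.map_cons, List.map_cons, PySem.Chars.join_cons_cons]
      rw [hl, hr, ← ih]
      simp [mwPiece, List.append_assoc]

-- B's recursion = (product of lengths of the filtered words, joined pieces)
theorem mwGo_eq (ws : List (List Char)) :
    mwGo ws = (((ws.filter mwPred).map (fun w => (w.length : Int))).prod, mwJ (ws.filter mwPred)) := by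
  induction ws with
  | nil => rfl
  | cons w ws ih =>
    unfold mwGo
    rw [ih]
    by_cases h : w = pyCapitalize w
    · have hd : mwPred w = false := by unfold mwPred; exact decide_eq_false (not_not_intro h)
      rw [if_pos h, List.filter_cons, hd]
      simp
    · have hd : mwPred w = true := by unfold mwPred; exact decide_eq_true h
      rw [if_neg h, List.filter_cons, hd]
      simp only [if_true]
      by_cases hL : ws.filter mwPred = []
      · simp [hL, mwJ, mwPiece, PySem.Chars.join, List.intercalate]
      · have hne := mwJ_ne_nil _ hL
        simp only [if_neg hne, Prod.mk.injEq]
        constructor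
        · simp [mul_comm]
        · show mwPiece w ++ ' ' :: mwJ (ws.filter mwPred) = mwJ (w :: ws.filter mwPred)
          obtain ⟨v, L', hvl⟩ := List.exists_cons_of_ne_nil hL
          rw [hvl]
          unfold mwJ
          simp only [List.map_cons]
          rw [PySem.Chars.join_cons_cons]
          simp [List.append_assoc]

-- A's forward product fold = the list product
theorem mw_foldl_prod (L : List (List Char)) :
    ∀ (m : Int), L.foldl (fun (m : Int) w => m * (w.length : Int)) m =
      m * ((L.map (fun w => (w.length : Int))).prod) := by
  induction L with
  | nil => intro m; simp
  | cons w L ih => intro m; rw [List.foldl_cons, ih]; simp [mul_assoc]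

-- ===== VERDICT (by name: the statement is the Claim_ definition above) =====
theorem multiply_words_spec : Claim_equal_multiply_words := by
  intro s _
  show multiply_words s = multiply_words_alt s
  unfold multiply_words multiply_words_alt
  rw [mwStep_foldl, mwGo_eq]
  simp only [List.nil_append]
  rw [mw_join_pieces, mw_foldl_prod, one_mul]
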